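-- pv_equiv track=rewrite | github.com/Context42-io/context42 | src/context42/indexer.py | _parse_rst_sections
-- ===== SOURCE A (Python) =====
-- def _parse_rst_sections(text: str) -> list[tuple[str, str]]:
--     """
--     Parse RST into (header, content) pairs.
--
--     RST uses underlines (and optional overlines) for headers:
--     - Characters: = - ` : . ' " ~ ^ _ * + #
--     - First style encountered becomes H1, second H2, etc.
--
--     Args:
--         text: RST text
--
--     Returns:
--         List of (header, content) tuples
--     """
--     lines = text.split('\n')
--     sections = []
--
--     # RST header underline characters
--     header_chars = set('=-`:\'.\"~^_*+#')
--
--     # Track header hierarchy (first seen = H1, etc)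
--     seen_styles: list[str] = []
--
--     current_header = ""
--     current_content_lines = []
--
--     i = 0
--     while i < len(lines):
--         line = lines[i]
--
--         # Check for header pattern
--         is_header = False
--         header_text = ""
--         style = ""
--
--         # Pattern 1: Overline + Title + Underline (e.g., === Title ===)
--         if (i + 2 < len(lines) and
--             len(line) >= 3 and
--             line[0] in header_chars and
--             len(set(line.strip())) == 1):
--
--             title_line = lines[i + 1]
--             underline = lines[i + 2] if i + 2 < len(lines) else ""
--
--             if (len(underline) >= 3 and
--                 underline[0] == line[0] and
--                 len(set(underline.strip())) == 1 and
--                 len(title_line.strip()) > 0):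
--
--                 is_header = True
--                 header_text = title_line.strip()
--                 style = line[0] + "_overline"
--
--                 if style not in seen_styles:
--                     seen_styles.append(style)
--
--                 i += 3
--
--         # Pattern 2: Title + Underline only
--         if not is_header and i + 1 < len(lines):
--             next_line = lines[i + 1]
--
--             if (len(line.strip()) > 0 and
--                 len(next_line) >= 3 and
--                 next_line[0] in header_chars and
--                 len(set(next_line.strip())) == 1 and
--                 len(next_line.strip()) >= len(line.strip())):
--
--                 is_header = True
--                 header_text = line.strip()
--                 style = next_line[0]
--
--                 if style not in seen_styles:
--                     seen_styles.append(style)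
--
--                 i += 2
--
--         if is_header:
--             # Save previous section
--             if current_header or current_content_lines:
--                 content = '\n'.join(current_content_lines)
--                 sections.append((current_header, content))
--
--             # Get header level based on order seen
--             level = seen_styles.index(style) + 1
--             header_prefix = "#" * min(level, 6)  # Convert to markdown-style for consistency
--
--             current_header = f"{header_prefix} {header_text}"
--             current_content_lines = []
--         else:
--             # Regular content line
--             current_content_lines.append(line)
--             i += 1
--
--     # Save last section
--     if current_header or current_content_lines:
--         content = '\n'.join(current_content_lines)
--         sections.append((current_header, content))
--
--     return sections
-- ===== SOURCE B (Python) =====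
-- def _parse_rst_sections(text: str) -> list[tuple[str, str]]:
--     """Two-pass rewrite: tokenize lines into header/content tokens, then fold tokens into sections."""
--     header_chars = set('=-`:\'."~^_*+#')
--     lines = text.split('\n')
--     n = len(lines)
--     # Pass 1: tokenize
--     tokens = []
--     i = 0
--     while i < n:
--         line = lines[i]
--         if (i + 2 < n and len(line) >= 3 and line[0] in header_chars
--                 and len(set(line.strip())) == 1):
--             title = lines[i + 1]
--             under = lines[i + 2]
--             if (len(under) >= 3 and under[0] == line[0]
--                     and len(set(under.strip())) == 1
--                     and len(title.strip()) > 0):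
--                 tokens.append(('header', title.strip(), line[0] + '_overline'))
--                 i += 3
--                 continue
--         if i + 1 < n:
--             nxt = lines[i + 1]
--             if (len(line.strip()) > 0 and len(nxt) >= 3
--                     and nxt[0] in header_chars
--                     and len(set(nxt.strip())) == 1
--                     and len(nxt.strip()) >= len(line.strip())):
--                 tokens.append(('header', line.strip(), nxt[0]))
--                 i += 2
--                 continue
--         tokens.append(('content', line))
--         i += 1
--     # Pass 2: fold tokens into sections
--     sections = []
--     seen = []
--     cur_header = ""
--     cur_lines = []
--     for tok in tokens:
--         if tok[0] == 'header':
--             _, htext, style = tok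
--             if cur_header or cur_lines:
--                 sections.append((cur_header, '\n'.join(cur_lines)))
--             if style not in seen:
--                 seen.append(style)
--             cur_header = '#' * min(seen.index(style) + 1, 6) + ' ' + htext
--             cur_lines = []
--         else:
--             cur_lines.append(tok[1])
--     if cur_header or cur_lines:
--         sections.append((cur_header, '\n'.join(cur_lines)))
--     return sections
-- ===== Notes on version B (the rewrite author's own statement) =====
-- stated objective: alternative
-- what changed: A's single while-loop that detects headers and assembles sections in one pass is split into a two-phase pipeline: a tokenizer that emits header/content tokens, then a fold over the token list that assembles the sections.
import Mathlib
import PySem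

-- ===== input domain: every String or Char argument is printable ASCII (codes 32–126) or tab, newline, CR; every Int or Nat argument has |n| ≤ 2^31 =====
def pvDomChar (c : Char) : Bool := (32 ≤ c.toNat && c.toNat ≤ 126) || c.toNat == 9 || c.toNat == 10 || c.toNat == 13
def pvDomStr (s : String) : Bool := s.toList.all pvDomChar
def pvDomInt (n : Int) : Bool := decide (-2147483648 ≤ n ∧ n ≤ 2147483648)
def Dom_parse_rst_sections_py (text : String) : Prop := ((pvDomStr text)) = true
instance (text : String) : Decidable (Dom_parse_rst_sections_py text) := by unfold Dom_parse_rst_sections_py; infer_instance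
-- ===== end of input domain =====

-- B restructures A's one-pass section builder as tokenize-then-fold; same output, proved equal.

-- ===== PORT A =====
-- shared condition helpers: both Python versions test the very same conditions, textually
def pvHeaderChars : List Char := ['=', '-', '`', ':', '\'', '.', '"', '~', '^', '_', '*', '+', '#']

-- line[0] in header_chars (False on empty line; only used under a length guard in both Pythons)
def pvIn0 (l : String) : Bool :=
  match PySem.Str.pyGet? l 0 with
  | some c => pvHeaderChars.contains c
  | none => false

-- len(set(l.strip())) == 1
def pvUni (l : String) : Bool := PySem.Set.len (PySem.Set.ofList (PySem.Str.strip l).toList) == (1 : Int)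

def pvStripLen (l : String) : Int := PySem.Str.len (PySem.Str.strip l)

-- l[0] as a Char; only used where len(l) >= 3 has been checked, so the default is unreachable
def pvC0 (l : String) : Char := l.toList.headD ' '

-- Pattern 1 (overline): all conditions of A's two nested ifs (no side effects between them)
def pvP1 (line title under : String) : Bool :=
  (3 ≤ PySem.Str.len line) && pvIn0 line && pvUni line &&
  (3 ≤ PySem.Str.len under) && (PySem.Str.pyGet? under 0 == PySem.Str.pyGet? line 0) &&
  pvUni under && (0 < pvStripLen title)

-- Pattern 2 (underline only)
def pvP2 (line nxt : String) : Bool :=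
  (0 < pvStripLen line) && (3 ≤ PySem.Str.len nxt) && pvIn0 nxt && pvUni nxt &&
  (pvStripLen line ≤ pvStripLen nxt)

-- if style not in seen_styles: seen_styles.append(style)
def pvSeenAdd (seen : List String) (style : String) : List String :=
  if seen.contains style then seen else seen ++ [style]

-- "#" * min(seen.index(style)+1, 6) + " " + header_text  (style ∈ seen holds at every use, so findIdx = list.index)
def pvMkHeader (seen : List String) (style htext : String) : String :=
  String.ofList (List.replicate (min (seen.findIdx (· == style) + 1) 6) '#' ++ ' ' :: htext.toList)

def pvStyle1 (line : String) : String := String.ofList (pvC0 line :: "_overline".toList)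
def pvStyle2 (nxt : String) : String := String.ofList [pvC0 nxt]

def pvEmit (h : String) (cls : List String) (secs : List (String × String)) : List (String × String) :=
  if h ≠ "" ∨ cls ≠ [] then secs ++ [(h, PySem.Str.join "\n" cls)] else secs

-- text.split('\n'): the separator is a nonempty literal, so split? is never none; getD is unreachable
def pvLines (text : String) : List String := (PySem.Str.split? text "\n").getD []

-- A's while-loop: the suffix lines[i:] is `rest`; i+2 < len(lines) ↔ rest has ≥ 3 elements, etc.
def pvLoopA (rest seen : List String) (h : String) (cls : List String)
    (secs : List (String × String)) : List (String × String) :=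
  match rest with
  | [] => pvEmit h cls secs
  | [line] => pvLoopA [] seen h (cls ++ [line]) secs
  | [line, nxt] =>
    if pvP2 line nxt then
      pvLoopA [] (pvSeenAdd seen (pvStyle2 nxt))
        (pvMkHeader (pvSeenAdd seen (pvStyle2 nxt)) (pvStyle2 nxt) (PySem.Str.strip line)) []
        (pvEmit h cls secs)
    else pvLoopA [nxt] seen h (cls ++ [line]) secs
  | line :: title :: under :: rest2 =>
    if pvP1 line title under then
      pvLoopA rest2 (pvSeenAdd seen (pvStyle1 line))
        (pvMkHeader (pvSeenAdd seen (pvStyle1 line)) (pvStyle1 line) (PySem.Str.strip title)) []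
        (pvEmit h cls secs)
    else if pvP2 line title then
      pvLoopA (under :: rest2) (pvSeenAdd seen (pvStyle2 title))
        (pvMkHeader (pvSeenAdd seen (pvStyle2 title)) (pvStyle2 title) (PySem.Str.strip line)) []
        (pvEmit h cls secs)
    else pvLoopA (title :: under :: rest2) seen h (cls ++ [line]) secs
  termination_by rest.length
  decreasing_by all_goals (simp only [List.length_cons]; omega)

def parse_rst_sections_py (text : String) : List (String × String) :=
  pvLoopA (pvLines text) [] "" [] []

-- ===== PORT B =====
inductive PvTok where
  | content : String → PvTok
  | header : String → String → PvTok
deriving DecidableEq, Repr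

-- Pass 1: tokenize the lines (same advance as A's loop, but emits tokens instead of building sections)
def pvTokenize (rest : List String) : List PvTok :=
  match rest with
  | [] => []
  | [line] => [PvTok.content line]
  | [line, nxt] =>
    if pvP2 line nxt then [PvTok.header (PySem.Str.strip line) (pvStyle2 nxt)]
    else PvTok.content line :: pvTokenize [nxt]
  | line :: title :: under :: rest2 =>
    if pvP1 line title under then
      PvTok.header (PySem.Str.strip title) (pvStyle1 line) :: pvTokenize rest2
    else if pvP2 line title then
      PvTok.header (PySem.Str.strip line) (pvStyle2 title) :: pvTokenize (under :: rest2)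
    else PvTok.content line :: pvTokenize (title :: under :: rest2)
  termination_by rest.length
  decreasing_by all_goals (simp only [List.length_cons]; omega)

-- Pass 2: fold the tokens; state = (seen_styles, current_header, current_content_lines, sections)
def pvStep (st : List String × String × List String × List (String × String)) (t : PvTok) :
    List String × String × List String × List (String × String) :=
  match st, t with
  | (seen, h, cls, secs), PvTok.content l => (seen, h, cls ++ [l], secs)
  | (seen, h, cls, secs), PvTok.header ht style =>
    let secs' := pvEmit h cls secs
    let seen' := pvSeenAdd seen style
    (seen', pvMkHeader seen' style ht, [], secs')

def pvFinish (st : List String × String × List String × List (String × String)) :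
    List (String × String) :=
  pvEmit st.2.1 st.2.2.1 st.2.2.2

def parse_rst_sections_py_alt (text : String) : List (String × String) :=
  pvFinish (List.foldl pvStep ([], "", [], []) (pvTokenize (pvLines text)))

-- ===== PRECONDITION & SPEC =====
def Spec_parse_rst_sections_py (text : String) (out : List (String × String)) : Prop := out = parse_rst_sections_py_alt text
instance (text : String) (out : List (String × String)) : Decidable (Spec_parse_rst_sections_py text out) := by unfold Spec_parse_rst_sections_py; infer_instance

-- ===== CLAIM (what is proved, stated in full; the proofs are below) =====
def Claim_equal_parse_rst_sections_py : Prop := ∀ (text : String), Dom_parse_rst_sections_py text → Spec_parse_rst_sections_py text (parse_rst_sections_py text)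

-- ===== LEMMAS AND PROOFS =====
theorem pvLoopA_eq_fold (rest seen : List String) (h : String) (cls : List String)
    (secs : List (String × String)) :
    pvLoopA rest seen h cls secs = pvFinish (List.foldl pvStep (seen, h, cls, secs) (pvTokenize rest)) := by
  induction rest, seen, h, cls, secs using pvLoopA.induct <;>
    simp only [pvLoopA, pvTokenize, pvFinish, pvStep, List.foldl, *,
      Bool.false_eq_true, if_true, if_false]

-- ===== VERDICT (by name: the statement is the Claim_ definition above) =====
theorem parse_rst_sections_py_spec : Claim_equal_parse_rst_sections_py := by
  intro text _
  unfold Spec_parse_rst_sections_py parse_rst_sections_py parse_rst_sections_py_alt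
  exact pvLoopA_eq_fold _ _ _ _ _
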